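-- pv_equiv track=rewrite | github.com/iteebz/spacebrr-api | space/lib/tools.py | disallowed_for
-- ===== SOURCE A (Python) =====
-- from enum import StrEnum
--
-- class Tool(StrEnum):
--     SHELL = "shell"
--     WRITE = "write"
--     EDIT = "edit"
--     READ = "read"
--     LS = "ls"
--     GLOB = "glob"
--     GREP = "grep"
--     FETCH = "fetch"
--     SEARCH = "search"
--
-- PROVIDER_TOOLS: dict[str, dict[Tool, list[str]]] = {
--     "claude": {
--         Tool.SHELL: ["Bash"],
--         Tool.WRITE: ["Write"],
--         Tool.EDIT: ["Edit", "MultiEdit"],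
--         Tool.READ: ["Read"],
--         Tool.LS: ["LS"],
--         Tool.GLOB: ["Glob"],
--         Tool.GREP: ["Grep"],
--         Tool.FETCH: ["WebFetch"],
--         Tool.SEARCH: ["WebSearch"],
--     },
--     "gemini": {
--         Tool.SHELL: ["run_shell_command"],
--         Tool.WRITE: ["write_file"],
--         Tool.EDIT: ["replace"],
--         Tool.READ: ["read_file"],
--         Tool.LS: ["list_directory"],
--         Tool.GLOB: ["glob"],
--         Tool.GREP: ["search_file_content"],
--         Tool.FETCH: ["web_fetch"],
--         Tool.SEARCH: ["google_web_search"],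
--     },
--     "codex": {
--         Tool.SHELL: ["Bash"],
--     },
-- }
--
-- ALWAYS_DISALLOWED: dict[str, list[str]] = {
--     "claude": ["NotebookRead", "NotebookEdit", "Task", "TodoWrite"],
--     "gemini": [],
--     "codex": [],
-- }
--
-- def all_provider_tools(provider: str) -> set[str]:
--     mapping = PROVIDER_TOOLS.get(provider, {})
--     return {tool for tools in mapping.values() for tool in tools}
--
-- def disallowed_for(provider: str, allowed: set[Tool] | None = None) -> list[str]:
--     base_disallowed = set(ALWAYS_DISALLOWED.get(provider, []))
--
--     if allowed is None:
--         return sorted(base_disallowed)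
--
--     mapping = PROVIDER_TOOLS.get(provider, {})
--     all_tools = all_provider_tools(provider)
--     allowed_tools = {t for cap in allowed for t in mapping.get(cap, [])}
--
--     return sorted(base_disallowed | (all_tools - allowed_tools))
-- ===== SOURCE B (Python) =====
-- from enum import StrEnum
--
-- class Tool(StrEnum):
--     SHELL = "shell"
--     WRITE = "write"
--     EDIT = "edit"
--     READ = "read"
--     LS = "ls"
--     GLOB = "glob"
--     GREP = "grep"
--     FETCH = "fetch"
--     SEARCH = "search"
--
-- # flat row tables: (provider, capability, tool) and (provider, tool)
-- TOOL_ROWS: list[tuple[str, str, str]] = [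
--     ("claude", "shell", "Bash"),
--     ("claude", "write", "Write"),
--     ("claude", "edit", "Edit"),
--     ("claude", "edit", "MultiEdit"),
--     ("claude", "read", "Read"),
--     ("claude", "ls", "LS"),
--     ("claude", "glob", "Glob"),
--     ("claude", "grep", "Grep"),
--     ("claude", "fetch", "WebFetch"),
--     ("claude", "search", "WebSearch"),
--     ("gemini", "shell", "run_shell_command"),
--     ("gemini", "write", "write_file"),
--     ("gemini", "edit", "replace"),
--     ("gemini", "read", "read_file"),
--     ("gemini", "ls", "list_directory"),
--     ("gemini", "glob", "glob"),
--     ("gemini", "grep", "search_file_content"),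
--     ("gemini", "fetch", "web_fetch"),
--     ("gemini", "search", "google_web_search"),
--     ("codex", "shell", "Bash"),
-- ]
--
-- ALWAYS_ROWS: list[tuple[str, str]] = [
--     ("claude", "NotebookRead"),
--     ("claude", "NotebookEdit"),
--     ("claude", "Task"),
--     ("claude", "TodoWrite"),
-- ]
--
-- def disallowed_for(provider: str, allowed=None) -> list[str]:
--     base = [t for p, t in ALWAYS_ROWS if p == provider]
--     if allowed is None:
--         return sorted(set(base))
--     pool = base + [t for p, cap, t in TOOL_ROWS if p == provider and cap not in allowed]
--     return sorted(set(pool))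
-- ===== Notes on version B (the rewrite author's own statement) =====
-- stated objective: alternative
-- what changed: B replaces A's nested dict-of-dicts plus set algebra (build all provider tools, build allowed tools, subtract, union with base) by a flat (provider, capability, tool) row table scanned once with a filter: rows of this provider whose capability is not allowed, appended to the base rows and deduplicated-and-sorted.
import Mathlib
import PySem

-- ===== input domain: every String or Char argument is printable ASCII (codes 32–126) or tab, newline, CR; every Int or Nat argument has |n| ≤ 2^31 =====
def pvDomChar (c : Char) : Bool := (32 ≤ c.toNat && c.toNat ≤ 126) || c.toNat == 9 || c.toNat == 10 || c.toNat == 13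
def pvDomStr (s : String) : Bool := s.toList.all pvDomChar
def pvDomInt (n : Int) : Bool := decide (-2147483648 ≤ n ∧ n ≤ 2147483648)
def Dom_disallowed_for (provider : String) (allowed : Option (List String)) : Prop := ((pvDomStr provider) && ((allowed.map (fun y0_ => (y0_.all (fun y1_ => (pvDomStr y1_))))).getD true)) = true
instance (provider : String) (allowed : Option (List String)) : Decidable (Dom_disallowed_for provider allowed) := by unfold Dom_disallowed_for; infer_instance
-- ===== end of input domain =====

-- B replaces A's nested-dict set algebra by one filtered scan of a flat
-- (provider, capability, tool) row table (objective: alternative; same cost).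

-- ===== PORT A =====
-- module constants (Tool is a StrEnum, so the capability keys are the plain strings)
def pvProviderToolsClaude : PySem.Dict String (List String) := PySem.Dict.ofList
  [("shell", ["Bash"]), ("write", ["Write"]), ("edit", ["Edit", "MultiEdit"]),
   ("read", ["Read"]), ("ls", ["LS"]), ("glob", ["Glob"]), ("grep", ["Grep"]),
   ("fetch", ["WebFetch"]), ("search", ["WebSearch"])]

def pvProviderToolsGemini : PySem.Dict String (List String) := PySem.Dict.ofList
  [("shell", ["run_shell_command"]), ("write", ["write_file"]), ("edit", ["replace"]),
   ("read", ["read_file"]), ("ls", ["list_directory"]), ("glob", ["glob"]),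
   ("grep", ["search_file_content"]), ("fetch", ["web_fetch"]), ("search", ["google_web_search"])]

def pvProviderToolsCodex : PySem.Dict String (List String) := PySem.Dict.ofList
  [("shell", ["Bash"])]

def PROVIDER_TOOLS : PySem.Dict String (PySem.Dict String (List String)) := PySem.Dict.ofList
  [("claude", pvProviderToolsClaude), ("gemini", pvProviderToolsGemini), ("codex", pvProviderToolsCodex)]

def ALWAYS_DISALLOWED : PySem.Dict String (List String) := PySem.Dict.ofList
  [("claude", ["NotebookRead", "NotebookEdit", "Task", "TodoWrite"]), ("gemini", []), ("codex", [])]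

def all_provider_tools (provider : String) : PySem.Set String :=
  let mapping := PROVIDER_TOOLS.getD provider PySem.Dict.empty
  PySem.Set.ofList (mapping.values.flatMap (fun tools => tools))

def disallowed_for (provider : String) (allowed : Option (List String)) : List String :=
  let base_disallowed := PySem.Set.ofList (ALWAYS_DISALLOWED.getD provider [])
  match allowed with
  | none => PySem.List.sorted base_disallowed (fun x => x) false
  | some al =>
    let mapping := PROVIDER_TOOLS.getD provider PySem.Dict.empty
    let all_tools := all_provider_tools provider
    let allowed_tools := al.foldl (fun s cap => PySem.Set.update s (mapping.getD cap [])) PySem.Set.empty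
    PySem.List.sorted (PySem.Set.union base_disallowed (PySem.Set.diff all_tools allowed_tools)) (fun x => x) false

-- ===== PORT B =====
-- flat row tables: (provider, capability, tool) and (provider, tool)
def TOOL_ROWS : List (String × String × String) :=
  [("claude", "shell", "Bash"), ("claude", "write", "Write"),
   ("claude", "edit", "Edit"), ("claude", "edit", "MultiEdit"),
   ("claude", "read", "Read"), ("claude", "ls", "LS"),
   ("claude", "glob", "Glob"), ("claude", "grep", "Grep"),
   ("claude", "fetch", "WebFetch"), ("claude", "search", "WebSearch"),
   ("gemini", "shell", "run_shell_command"), ("gemini", "write", "write_file"),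
   ("gemini", "edit", "replace"), ("gemini", "read", "read_file"),
   ("gemini", "ls", "list_directory"), ("gemini", "glob", "glob"),
   ("gemini", "grep", "search_file_content"), ("gemini", "fetch", "web_fetch"),
   ("gemini", "search", "google_web_search"), ("codex", "shell", "Bash")]

def ALWAYS_ROWS : List (String × String) :=
  [("claude", "NotebookRead"), ("claude", "NotebookEdit"),
   ("claude", "Task"), ("claude", "TodoWrite")]

def disallowed_for_alt (provider : String) (allowed : Option (List String)) : List String :=
  let base := (ALWAYS_ROWS.filter (fun r => r.1 == provider)).map (fun r => r.2)
  match allowed with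
  | none => PySem.List.sorted (PySem.Set.ofList base) (fun x => x) false
  | some al =>
    let pool := base ++ (TOOL_ROWS.filter
        (fun r => r.1 == provider && !(al.contains r.2.1))).map (fun r => r.2.2)
    PySem.List.sorted (PySem.Set.ofList pool) (fun x => x) false

-- ===== PRECONDITION & SPEC =====
def Spec_disallowed_for (provider : String) (allowed : Option (List String)) (out : List String) : Prop := out = disallowed_for_alt provider allowed
instance (provider : String) (allowed : Option (List String)) (out : List String) : Decidable (Spec_disallowed_for provider allowed out) := by unfold Spec_disallowed_for; infer_instance

-- ===== CLAIM (what is proved, stated in full; the proofs are below) =====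
def Claim_equal_disallowed_for : Prop := ∀ (provider : String) (allowed : Option (List String)), Dom_disallowed_for provider allowed → Spec_disallowed_for provider allowed (disallowed_for provider allowed)

-- ===== LEMMAS AND PROOFS =====

-- the base lists coincide for every provider (literal for the three known ones, [] otherwise)
theorem base_eq (provider : String) :
    ALWAYS_DISALLOWED.getD provider [] =
      (ALWAYS_ROWS.filter (fun r => r.1 == provider)).map (fun r => r.2) := by
  cases h : ALWAYS_DISALLOWED.get? provider with
  | some v =>
    have hm := PySem.Dict.mem_items_of_get?_eq_some _ h
    have hit : ALWAYS_DISALLOWED.items =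
        [("claude", ["NotebookRead", "NotebookEdit", "Task", "TodoWrite"]),
         ("gemini", []), ("codex", [])] := by decide
    rw [hit] at hm
    simp only [List.mem_cons, List.not_mem_nil, or_false, Prod.mk.injEq] at hm
    rw [PySem.Dict.getD_of_get?_eq_some _ _ h]
    rcases hm with ⟨rfl, rfl⟩ | ⟨rfl, rfl⟩ | ⟨rfl, rfl⟩ <;> decide
  | none =>
    rw [PySem.Dict.getD_of_get?_eq_none _ _ h]
    have h1 : provider ≠ "claude" := by rintro rfl; exact absurd h (by decide)
    have hne : ("claude" == provider) = false := by
      simp only [beq_eq_false_iff_ne, ne_eq]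
      exact fun he => h1 he.symm
    simp [ALWAYS_ROWS, List.filter, hne]

-- membership in a filter by first component
theorem exists_filter_fst {α : Type} (rows : List (String × α)) (prov : String) (Q : String × α → Prop) :
    (∃ r ∈ rows, r.1 = prov ∧ Q r) ↔ ∃ r ∈ rows.filter (fun r => r.1 == prov), Q r := by
  constructor
  · rintro ⟨r, hr, hp, hq⟩
    exact ⟨r, List.mem_filter.mpr ⟨hr, by simp [hp]⟩, hq⟩
  · rintro ⟨r, hr, hq⟩
    obtain ⟨h1, h2⟩ := List.mem_filter.mp hr
    exact ⟨r, h1, by simpa using h2, hq⟩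

-- membership across the flattening of a capability map into rows
theorem exists_flat (items : List (String × List String)) (prov : String) (al : List String) (x : String) :
    (∃ r ∈ items.flatMap (fun p => p.2.map (fun t => (prov, p.1, t))), r.2.1 ∉ al ∧ r.2.2 = x) ↔
      (∃ p ∈ items, p.1 ∉ al ∧ x ∈ p.2) := by
  simp only [List.mem_flatMap, List.mem_map]
  constructor
  · rintro ⟨r, ⟨p, hp, t, ht, rfl⟩, hna, hx⟩
    exact ⟨p, hp, hna, hx ▸ ht⟩
  · rintro ⟨p, hp, hna, hx⟩
    exact ⟨(prov, p.1, x), ⟨p, hp, x, hx, rfl⟩, hna, rfl⟩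

theorem rows_case (m : PySem.Dict String (List String)) (prov : String) (al : List String) (x : String)
    (hf : TOOL_ROWS.filter (fun r => r.1 == prov) =
      m.items.flatMap (fun p => p.2.map (fun t => (prov, p.1, t)))) :
    (∃ p ∈ m.items, p.1 ∉ al ∧ x ∈ p.2) ↔
      (∃ r ∈ TOOL_ROWS, r.1 = prov ∧ r.2.1 ∉ al ∧ r.2.2 = x) := by
  rw [exists_filter_fst TOOL_ROWS prov (fun r => r.2.1 ∉ al ∧ r.2.2 = x), hf]
  exact (exists_flat m.items prov al x).symm

-- A's per-provider capability map and B's flat rows describe the same triples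
theorem rows_iff (provider : String) (al : List String) (x : String) :
    (∃ p ∈ (PROVIDER_TOOLS.getD provider PySem.Dict.empty).items, p.1 ∉ al ∧ x ∈ p.2) ↔
      (∃ r ∈ TOOL_ROWS, r.1 = provider ∧ r.2.1 ∉ al ∧ r.2.2 = x) := by
  cases h : PROVIDER_TOOLS.get? provider with
  | some m =>
    have hm := PySem.Dict.mem_items_of_get?_eq_some _ h
    have hit : PROVIDER_TOOLS.items =
        [("claude", pvProviderToolsClaude), ("gemini", pvProviderToolsGemini),
         ("codex", pvProviderToolsCodex)] := by decide
    rw [hit] at hm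
    simp only [List.mem_cons, List.not_mem_nil, or_false, Prod.mk.injEq] at hm
    rw [PySem.Dict.getD_of_get?_eq_some _ _ h]
    rcases hm with ⟨rfl, rfl⟩ | ⟨rfl, rfl⟩ | ⟨rfl, rfl⟩
    · exact rows_case pvProviderToolsClaude "claude" al x (by decide)
    · exact rows_case pvProviderToolsGemini "gemini" al x (by decide)
    · exact rows_case pvProviderToolsCodex "codex" al x (by decide)
  | none =>
    rw [PySem.Dict.getD_of_get?_eq_none _ _ h]
    have h1 : provider ≠ "claude" := by rintro rfl; exact absurd h (by decide)
    have h2 : provider ≠ "gemini" := by rintro rfl; exact absurd h (by decide)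
    have h3 : provider ≠ "codex" := by rintro rfl; exact absurd h (by decide)
    constructor
    · rintro ⟨p, hp, -⟩
      simp [PySem.Dict.empty] at hp
    · rintro ⟨r, hr, hp, -⟩
      have hin : r.1 ∈ (["claude", "gemini", "codex"] : List String) := by
        have hall : ∀ q ∈ TOOL_ROWS, q.1 ∈ (["claude", "gemini", "codex"] : List String) := by decide
        exact hall r hr
      rcases (by simpa using hin : r.1 = "claude" ∨ r.1 = "gemini" ∨ r.1 = "codex") with e | e | e
      · exact (h1 (hp.symm.trans e)).elim
      · exact (h2 (hp.symm.trans e)).elim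
      · exact (h3 (hp.symm.trans e)).elim

-- unpacking membership in B's filtered row list
theorem mem_filter_cond (rows : List (String × String × String)) (prov : String)
    (al : List String) (r : String × String × String) :
    r ∈ rows.filter (fun r => r.1 == prov && !(al.contains r.2.1)) ↔
      r ∈ rows ∧ r.1 = prov ∧ r.2.1 ∉ al := by
  constructor
  · intro hrf
    obtain ⟨h1, h2⟩ := List.mem_filter.mp hrf
    obtain ⟨hb1, hb2⟩ := (Bool.and_eq_true _ _).mp h2
    exact ⟨h1, by simpa using hb1, by simpa using hb2⟩
  · rintro ⟨hr, hp, hna⟩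
    exact List.mem_filter.mpr ⟨hr, by simp [hp, hna]⟩

-- a well-formed capability map: unique keys, and tool lists of distinct capabilities share no tool
def OkMap (m : PySem.Dict String (List String)) : Prop :=
  m.keys.Nodup ∧ ∀ p ∈ m.items, ∀ q ∈ m.items, p = q ∨ ∀ x ∈ p.2, x ∉ q.2

theorem okMap_getD (provider : String) :
    OkMap (PROVIDER_TOOLS.getD provider PySem.Dict.empty) := by
  cases h : PROVIDER_TOOLS.get? provider with
  | none =>
    rw [PySem.Dict.getD_of_get?_eq_none _ _ h]
    constructor
    · decide
    · intro p hp; simp [PySem.Dict.empty] at hp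
  | some m =>
    rw [PySem.Dict.getD_of_get?_eq_some _ _ h]
    have hm := PySem.Dict.mem_items_of_get?_eq_some _ h
    have : PROVIDER_TOOLS.items =
        [("claude", pvProviderToolsClaude), ("gemini", pvProviderToolsGemini),
         ("codex", pvProviderToolsCodex)] := by decide
    rw [this] at hm
    simp only [List.mem_cons, List.not_mem_nil, or_false, Prod.mk.injEq] at hm
    rcases hm with ⟨_, rfl⟩ | ⟨_, rfl⟩ | ⟨_, rfl⟩ <;> exact ⟨by decide, by decide⟩

-- membership in A's allowed_tools loop
theorem mem_foldl_A (al : List String) (m : PySem.Dict String (List String))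
    (s : PySem.Set String) (x : String) :
    x ∈ al.foldl (fun s cap => PySem.Set.update s (m.getD cap [])) s ↔
      x ∈ s ∨ ∃ c ∈ al, x ∈ m.getD c [] := by
  induction al generalizing s with
  | nil => simp
  | cons c rest ih =>
    simp only [List.foldl_cons, ih, PySem.Set.mem_update, List.mem_cons]
    constructor
    · rintro ((h | h) | ⟨c', hc', hx⟩)
      · exact Or.inl h
      · exact Or.inr ⟨c, Or.inl rfl, h⟩
      · exact Or.inr ⟨c', Or.inr hc', hx⟩
    · rintro (h | ⟨c', (rfl | hc'), hx⟩)
      · exact Or.inl (Or.inl h)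
      · exact Or.inl (Or.inr hx)
      · exact Or.inr ⟨c', hc', hx⟩

-- on a well-formed map, "some tool of the map, not allowed by any allowed cap"
-- is exactly "a tool of some cap that is not allowed"
theorem mem_A_iff_not_allowed (m : PySem.Dict String (List String)) (hok : OkMap m)
    (al : List String) (x : String) :
    ((∃ ts ∈ m.values, x ∈ ts) ∧ ¬ ∃ c ∈ al, x ∈ m.getD c []) ↔
      ∃ p ∈ m.items, p.1 ∉ al ∧ x ∈ p.2 := by
  obtain ⟨hnd, hdisj⟩ := hok
  have hvals : m.values = m.items.map (fun p => p.2) := rfl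
  constructor
  · rintro ⟨⟨ts, hts, hx⟩, hno⟩
    rw [hvals] at hts
    obtain ⟨⟨c, ts'⟩, hp, rfl⟩ := List.mem_map.mp hts
    refine ⟨(c, ts'), hp, ?_, hx⟩
    intro hal
    exact hno ⟨c, hal, by rw [PySem.Dict.getD_of_mem_items m hp hnd []]; exact hx⟩
  · rintro ⟨p, hp, hna, hx⟩
    refine ⟨⟨p.2, by rw [hvals]; exact List.mem_map.mpr ⟨p, hp, rfl⟩, hx⟩, ?_⟩
    rintro ⟨c, hc, hxc⟩
    cases hg : m.get? c with
    | none => rw [PySem.Dict.getD_of_get?_eq_none _ _ hg] at hxc; exact List.not_mem_nil hxc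
    | some ts =>
      rw [PySem.Dict.getD_of_get?_eq_some _ _ hg] at hxc
      have hq : (c, ts) ∈ m.items := PySem.Dict.mem_items_of_get?_eq_some _ hg
      rcases hdisj p hp (c, ts) hq with heq | hdis
      · exact hna (heq ▸ hc)
      · exact hdis x hx hxc

-- ===== VERDICT (by name: the statement is the Claim_ definition above) =====
theorem disallowed_for_spec : Claim_equal_disallowed_for := by
  intro provider allowed _
  unfold Spec_disallowed_for disallowed_for disallowed_for_alt
  cases allowed with
  | none =>
    exact congrArg (fun l => PySem.List.sorted (PySem.Set.ofList l) (fun x => x) false)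
      (base_eq provider)
  | some al =>
    simp only
    apply PySem.List.sorted_eq_sorted_of_perm _ _ _ (fun a b h => h)
    apply (List.perm_ext_iff_of_nodup ?_ ?_).mpr
    · intro x
      rw [PySem.Set.mem_union, PySem.Set.mem_diff, mem_foldl_A, PySem.Set.mem_ofList,
        PySem.Set.mem_ofList, List.mem_append, base_eq provider]
      simp only [List.not_mem_nil, false_or, PySem.Set.empty]
      have hA := mem_A_iff_not_allowed _ (okMap_getD provider) al x
      have hR := rows_iff provider al x
      unfold all_provider_tools
      simp only [PySem.Set.mem_ofList, List.mem_flatMap] at hA ⊢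
      constructor
      · rintro (hb | ⟨hall, hna⟩)
        · exact Or.inl hb
        · obtain ⟨r, hr, hp, hna', hx⟩ := hR.mp (hA.mp ⟨hall, hna⟩)
          exact Or.inr (List.mem_map.mpr
            ⟨r, (mem_filter_cond TOOL_ROWS provider al r).mpr ⟨hr, hp, hna'⟩, hx⟩)
      · rintro (hb | hc)
        · exact Or.inl hb
        · obtain ⟨r, hrf, hx⟩ := List.mem_map.mp hc
          obtain ⟨hr, hp, hna'⟩ := (mem_filter_cond TOOL_ROWS provider al r).mp hrf
          exact Or.inr (hA.mpr (hR.mpr ⟨r, hr, hp, hna', hx⟩))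
    · exact PySem.Set.nodup_union _ _ (PySem.Set.nodup_ofList _)
    · exact PySem.Set.nodup_ofList _
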